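-- pv_equiv track=rewrite | github.com/Ai-Whisperers/ultrametric-antigen-AI | deliverables/partners/alejandra_rojas/research/functional_convergence/find_convergence_points.py | get_gene_annotation
-- ===== SOURCE A (Python) =====
-- def get_gene_annotation(nuc_position: int) -> str:
--     """Get gene name for a nucleotide position."""
--     genes = [
--         (0, 94, "5UTR"), (94, 436, "C"), (436, 934, "prM"),
--         (934, 2419, "E"), (2419, 3474, "NS1"), (3474, 4128, "NS2A"),
--         (4128, 4518, "NS2B"), (4518, 6378, "NS3"), (6378, 6531, "NS4A"),
--         (6531, 6600, "2K"), (6600, 7350, "NS4B"), (7350, 10095, "NS5"),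
--         (10095, 10723, "3UTR"),
--     ]
--     for start, end, name in genes:
--         if start <= nuc_position < end:
--             return name
--     return "intergenic"
-- ===== SOURCE B (Python) =====
-- # Binary search over sorted interval start boundaries instead of a linear scan.
-- _STARTS = [0, 94, 436, 934, 2419, 3474, 4128, 4518, 6378, 6531, 6600, 7350, 10095]
-- _NAMES = ["5UTR", "C", "prM", "E", "NS1", "NS2A", "NS2B", "NS3", "NS4A", "2K", "NS4B", "NS5", "3UTR"]
--
--
-- def get_gene_annotation(nuc_position: int) -> str:
--     """Get gene name for a nucleotide position."""
--     if nuc_position < 0 or nuc_position >= 10723: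
--         return "intergenic"
--     lo, hi = 0, len(_STARTS)
--     while lo < hi:
--         mid = (lo + hi) // 2
--         if _STARTS[mid] <= nuc_position:
--             lo = mid + 1
--         else:
--             hi = mid
--     return _NAMES[lo - 1]
-- ===== Notes on version B (the rewrite author's own statement) =====
-- stated objective: alternative
-- what changed: Replaces the linear scan over (start,end,name) triples with a binary search (bisect_right by hand) over the sorted start boundaries plus a single range guard.
import Mathlib
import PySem

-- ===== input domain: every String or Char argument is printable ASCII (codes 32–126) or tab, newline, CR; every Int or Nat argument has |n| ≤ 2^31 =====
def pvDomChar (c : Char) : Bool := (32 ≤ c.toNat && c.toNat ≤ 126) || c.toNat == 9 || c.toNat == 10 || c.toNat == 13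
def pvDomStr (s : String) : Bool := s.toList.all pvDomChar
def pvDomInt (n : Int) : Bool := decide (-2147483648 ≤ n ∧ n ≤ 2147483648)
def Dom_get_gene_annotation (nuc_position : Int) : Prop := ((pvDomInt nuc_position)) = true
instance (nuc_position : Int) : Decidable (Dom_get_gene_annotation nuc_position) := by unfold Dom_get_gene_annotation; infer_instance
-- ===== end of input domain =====

-- B replaces A's linear scan over intervals by a binary search over the sorted start boundaries (alternative algorithm; same result).

-- ===== PORT A =====
-- the for-loop with early return, as structural recursion over the genes list
def geneScan (n : Int) : List (Int × Int × String) → String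
  | [] => "intergenic"
  | (s, e, name) :: rest => if s ≤ n ∧ n < e then name else geneScan n rest

def get_gene_annotation (nuc_position : Int) : String :=
  geneScan nuc_position
    [(0, 94, "5UTR"), (94, 436, "C"), (436, 934, "prM"),
     (934, 2419, "E"), (2419, 3474, "NS1"), (3474, 4128, "NS2A"),
     (4128, 4518, "NS2B"), (4518, 6378, "NS3"), (6378, 6531, "NS4A"),
     (6531, 6600, "2K"), (6600, 7350, "NS4B"), (7350, 10095, "NS5"),
     (10095, 10723, "3UTR")]

-- ===== PORT B =====
def pvStarts : List Int := [0, 94, 436, 934, 2419, 3474, 4128, 4518, 6378, 6531, 6600, 7350, 10095]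
def pvNames : List String := ["5UTR", "C", "prM", "E", "NS1", "NS2A", "NS2B", "NS3", "NS4A", "2K", "NS4B", "NS5", "3UTR"]

-- the while-loop of Source B (hand-written bisect_right over pvStarts)
def bisectLoop (n : Int) (lo hi : Nat) : Nat :=
  if lo < hi then
    let mid := (lo + hi) / 2
    if pvStarts.getD mid 0 ≤ n then bisectLoop n (mid + 1) hi else bisectLoop n lo mid
  else lo
termination_by hi - lo
decreasing_by all_goals omega

def get_gene_annotation_alt (nuc_position : Int) : String :=
  if nuc_position < 0 ∨ 10723 ≤ nuc_position then "intergenic"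
  else pvNames.getD (bisectLoop nuc_position 0 pvStarts.length - 1) ""

-- ===== PRECONDITION & SPEC =====
def Spec_get_gene_annotation (nuc_position : Int) (out : String) : Prop := out = get_gene_annotation_alt nuc_position
instance (nuc_position : Int) (out : String) : Decidable (Spec_get_gene_annotation nuc_position out) := by unfold Spec_get_gene_annotation; infer_instance

-- ===== CLAIM (what is proved, stated in full; the proofs are below) =====
def Claim_equal_get_gene_annotation : Prop := ∀ (nuc_position : Int), Dom_get_gene_annotation nuc_position → Spec_get_gene_annotation nuc_position (get_gene_annotation nuc_position)

-- ===== LEMMAS AND PROOFS =====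

-- ===== VERDICT (by name: the statement is the Claim_ definition above) =====
lemma bl_13_13 (n : Int) : bisectLoop n 13 13 = 13 := by rw [bisectLoop]; norm_num

lemma bl_12_12 (n : Int) : bisectLoop n 12 12 = 12 := by rw [bisectLoop]; norm_num

lemma bl_11_11 (n : Int) : bisectLoop n 11 11 = 11 := by rw [bisectLoop]; norm_num

lemma bl_11_12 (n : Int) : bisectLoop n 11 12 = (if (7350 : Int) ≤ n then bisectLoop n 12 12 else bisectLoop n 11 11) := by rw [bisectLoop]; norm_num [pvStarts, List.getD]

lemma bl_11_13 (n : Int) : bisectLoop n 11 13 = (if (10095 : Int) ≤ n then bisectLoop n 13 13 else bisectLoop n 11 12) := by rw [bisectLoop]; norm_num [pvStarts, List.getD]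

lemma bl_10_10 (n : Int) : bisectLoop n 10 10 = 10 := by rw [bisectLoop]; norm_num

lemma bl_9_9 (n : Int) : bisectLoop n 9 9 = 9 := by rw [bisectLoop]; norm_num

lemma bl_9_10 (n : Int) : bisectLoop n 9 10 = (if (6531 : Int) ≤ n then bisectLoop n 10 10 else bisectLoop n 9 9) := by rw [bisectLoop]; norm_num [pvStarts, List.getD]

lemma bl_8_8 (n : Int) : bisectLoop n 8 8 = 8 := by rw [bisectLoop]; norm_num

lemma bl_7_7 (n : Int) : bisectLoop n 7 7 = 7 := by rw [bisectLoop]; norm_num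

lemma bl_7_8 (n : Int) : bisectLoop n 7 8 = (if (4518 : Int) ≤ n then bisectLoop n 8 8 else bisectLoop n 7 7) := by rw [bisectLoop]; norm_num [pvStarts, List.getD]

lemma bl_7_10 (n : Int) : bisectLoop n 7 10 = (if (6378 : Int) ≤ n then bisectLoop n 9 10 else bisectLoop n 7 8) := by rw [bisectLoop]; norm_num [pvStarts, List.getD]

lemma bl_7_13 (n : Int) : bisectLoop n 7 13 = (if (6600 : Int) ≤ n then bisectLoop n 11 13 else bisectLoop n 7 10) := by rw [bisectLoop]; norm_num [pvStarts, List.getD]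

lemma bl_6_6 (n : Int) : bisectLoop n 6 6 = 6 := by rw [bisectLoop]; norm_num

lemma bl_5_5 (n : Int) : bisectLoop n 5 5 = 5 := by rw [bisectLoop]; norm_num

lemma bl_4_4 (n : Int) : bisectLoop n 4 4 = 4 := by rw [bisectLoop]; norm_num

lemma bl_4_5 (n : Int) : bisectLoop n 4 5 = (if (2419 : Int) ≤ n then bisectLoop n 5 5 else bisectLoop n 4 4) := by rw [bisectLoop]; norm_num [pvStarts, List.getD]

lemma bl_4_6 (n : Int) : bisectLoop n 4 6 = (if (3474 : Int) ≤ n then bisectLoop n 6 6 else bisectLoop n 4 5) := by rw [bisectLoop]; norm_num [pvStarts, List.getD]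

lemma bl_3_3 (n : Int) : bisectLoop n 3 3 = 3 := by rw [bisectLoop]; norm_num

lemma bl_2_2 (n : Int) : bisectLoop n 2 2 = 2 := by rw [bisectLoop]; norm_num

lemma bl_2_3 (n : Int) : bisectLoop n 2 3 = (if (436 : Int) ≤ n then bisectLoop n 3 3 else bisectLoop n 2 2) := by rw [bisectLoop]; norm_num [pvStarts, List.getD]

lemma bl_1_1 (n : Int) : bisectLoop n 1 1 = 1 := by rw [bisectLoop]; norm_num

lemma bl_0_0 (n : Int) : bisectLoop n 0 0 = 0 := by rw [bisectLoop]; norm_num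

lemma bl_0_1 (n : Int) : bisectLoop n 0 1 = (if (0 : Int) ≤ n then bisectLoop n 1 1 else bisectLoop n 0 0) := by rw [bisectLoop]; norm_num [pvStarts, List.getD]

lemma bl_0_3 (n : Int) : bisectLoop n 0 3 = (if (94 : Int) ≤ n then bisectLoop n 2 3 else bisectLoop n 0 1) := by rw [bisectLoop]; norm_num [pvStarts, List.getD]

lemma bl_0_6 (n : Int) : bisectLoop n 0 6 = (if (934 : Int) ≤ n then bisectLoop n 4 6 else bisectLoop n 0 3) := by rw [bisectLoop]; norm_num [pvStarts, List.getD]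

lemma bl_0_13 (n : Int) : bisectLoop n 0 13 = (if (4128 : Int) ≤ n then bisectLoop n 7 13 else bisectLoop n 0 6) := by rw [bisectLoop]; norm_num [pvStarts, List.getD]

lemma names_eval (n : Int) : pvNames.getD (bisectLoop n 0 13 - 1) "" = (if (4128 : Int) ≤ n then (if (6600 : Int) ≤ n then (if (10095 : Int) ≤ n then "3UTR" else (if (7350 : Int) ≤ n then "NS5" else "NS4B")) else (if (6378 : Int) ≤ n then (if (6531 : Int) ≤ n then "2K" else "NS4A") else (if (4518 : Int) ≤ n then "NS3" else "NS2B"))) else (if (934 : Int) ≤ n then (if (3474 : Int) ≤ n then "NS2A" else (if (2419 : Int) ≤ n then "NS1" else "E")) else (if (94 : Int) ≤ n then (if (436 : Int) ≤ n then "prM" else "C") else (if (0 : Int) ≤ n then "5UTR" else "5UTR")))) := by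
  by_cases h0_13 : (4128 : Int) ≤ n
  · -- then
    by_cases h7_13 : (6600 : Int) ≤ n
    · -- then
      by_cases h11_13 : (10095 : Int) ≤ n
      · -- then
        simp [bl_0_13, bl_7_13, bl_11_13, bl_13_13, h0_13, h7_13, h11_13, pvNames, List.getD]
      · -- else
        by_cases h11_12 : (7350 : Int) ≤ n
        · -- then
          simp [bl_0_13, bl_7_13, bl_11_13, bl_11_12, bl_12_12, h0_13, h7_13, h11_13, h11_12, pvNames, List.getD]
        · -- else
          simp [bl_0_13, bl_7_13, bl_11_13, bl_11_12, bl_11_11, h0_13, h7_13, h11_13, h11_12, pvNames, List.getD]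
    · -- else
      by_cases h7_10 : (6378 : Int) ≤ n
      · -- then
        by_cases h9_10 : (6531 : Int) ≤ n
        · -- then
          simp [bl_0_13, bl_7_13, bl_7_10, bl_9_10, bl_10_10, h0_13, h7_13, h7_10, h9_10, pvNames, List.getD]
        · -- else
          simp [bl_0_13, bl_7_13, bl_7_10, bl_9_10, bl_9_9, h0_13, h7_13, h7_10, h9_10, pvNames, List.getD]
      · -- else
        by_cases h7_8 : (4518 : Int) ≤ n
        · -- then
          simp [bl_0_13, bl_7_13, bl_7_10, bl_7_8, bl_8_8, h0_13, h7_13, h7_10, h7_8, pvNames, List.getD]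
        · -- else
          simp [bl_0_13, bl_7_13, bl_7_10, bl_7_8, bl_7_7, h0_13, h7_13, h7_10, h7_8, pvNames, List.getD]
  · -- else
    by_cases h0_6 : (934 : Int) ≤ n
    · -- then
      by_cases h4_6 : (3474 : Int) ≤ n
      · -- then
        simp [bl_0_13, bl_0_6, bl_4_6, bl_6_6, h0_13, h0_6, h4_6, pvNames, List.getD]
      · -- else
        by_cases h4_5 : (2419 : Int) ≤ n
        · -- then
          simp [bl_0_13, bl_0_6, bl_4_6, bl_4_5, bl_5_5, h0_13, h0_6, h4_6, h4_5, pvNames, List.getD]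
        · -- else
          simp [bl_0_13, bl_0_6, bl_4_6, bl_4_5, bl_4_4, h0_13, h0_6, h4_6, h4_5, pvNames, List.getD]
    · -- else
      by_cases h0_3 : (94 : Int) ≤ n
      · -- then
        by_cases h2_3 : (436 : Int) ≤ n
        · -- then
          simp [bl_0_13, bl_0_6, bl_0_3, bl_2_3, bl_3_3, h0_13, h0_6, h0_3, h2_3, pvNames, List.getD]
        · -- else
          simp [bl_0_13, bl_0_6, bl_0_3, bl_2_3, bl_2_2, h0_13, h0_6, h0_3, h2_3, pvNames, List.getD]
      · -- else
        by_cases h0_1 : (0 : Int) ≤ n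
        · -- then
          simp [bl_0_13, bl_0_6, bl_0_3, bl_0_1, bl_1_1, h0_13, h0_6, h0_3, h0_1, pvNames, List.getD]
        · -- else
          simp [bl_0_13, bl_0_6, bl_0_3, bl_0_1, bl_0_0, h0_13, h0_6, h0_3, h0_1, pvNames, List.getD]

lemma starts_len : pvStarts.length = 13 := rfl

lemma alt_in_0 (n : Int) (h1 : (0 : Int) ≤ n) (h2 : n < 94) : get_gene_annotation_alt n = "5UTR" := by
  unfold get_gene_annotation_alt
  rw [starts_len, names_eval]
  rw [if_neg (by omega), if_neg (by omega), if_neg (by omega), if_neg (by omega), if_pos (by omega)]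

lemma alt_in_1 (n : Int) (h1 : (94 : Int) ≤ n) (h2 : n < 436) : get_gene_annotation_alt n = "C" := by
  unfold get_gene_annotation_alt
  rw [starts_len, names_eval]
  rw [if_neg (by omega), if_neg (by omega), if_neg (by omega), if_pos (by omega), if_neg (by omega)]

lemma alt_in_2 (n : Int) (h1 : (436 : Int) ≤ n) (h2 : n < 934) : get_gene_annotation_alt n = "prM" := by
  unfold get_gene_annotation_alt
  rw [starts_len, names_eval]
  rw [if_neg (by omega), if_neg (by omega), if_neg (by omega), if_pos (by omega), if_pos (by omega)]

lemma alt_in_3 (n : Int) (h1 : (934 : Int) ≤ n) (h2 : n < 2419) : get_gene_annotation_alt n = "E" := by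
  unfold get_gene_annotation_alt
  rw [starts_len, names_eval]
  rw [if_neg (by omega), if_neg (by omega), if_pos (by omega), if_neg (by omega), if_neg (by omega)]

lemma alt_in_4 (n : Int) (h1 : (2419 : Int) ≤ n) (h2 : n < 3474) : get_gene_annotation_alt n = "NS1" := by
  unfold get_gene_annotation_alt
  rw [starts_len, names_eval]
  rw [if_neg (by omega), if_neg (by omega), if_pos (by omega), if_neg (by omega), if_pos (by omega)]

lemma alt_in_5 (n : Int) (h1 : (3474 : Int) ≤ n) (h2 : n < 4128) : get_gene_annotation_alt n = "NS2A" := by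
  unfold get_gene_annotation_alt
  rw [starts_len, names_eval]
  rw [if_neg (by omega), if_neg (by omega), if_pos (by omega), if_pos (by omega)]

lemma alt_in_6 (n : Int) (h1 : (4128 : Int) ≤ n) (h2 : n < 4518) : get_gene_annotation_alt n = "NS2B" := by
  unfold get_gene_annotation_alt
  rw [starts_len, names_eval]
  rw [if_neg (by omega), if_pos (by omega), if_neg (by omega), if_neg (by omega), if_neg (by omega)]

lemma alt_in_7 (n : Int) (h1 : (4518 : Int) ≤ n) (h2 : n < 6378) : get_gene_annotation_alt n = "NS3" := by
  unfold get_gene_annotation_alt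
  rw [starts_len, names_eval]
  rw [if_neg (by omega), if_pos (by omega), if_neg (by omega), if_neg (by omega), if_pos (by omega)]

lemma alt_in_8 (n : Int) (h1 : (6378 : Int) ≤ n) (h2 : n < 6531) : get_gene_annotation_alt n = "NS4A" := by
  unfold get_gene_annotation_alt
  rw [starts_len, names_eval]
  rw [if_neg (by omega), if_pos (by omega), if_neg (by omega), if_pos (by omega), if_neg (by omega)]

lemma alt_in_9 (n : Int) (h1 : (6531 : Int) ≤ n) (h2 : n < 6600) : get_gene_annotation_alt n = "2K" := by
  unfold get_gene_annotation_alt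
  rw [starts_len, names_eval]
  rw [if_neg (by omega), if_pos (by omega), if_neg (by omega), if_pos (by omega), if_pos (by omega)]

lemma alt_in_10 (n : Int) (h1 : (6600 : Int) ≤ n) (h2 : n < 7350) : get_gene_annotation_alt n = "NS4B" := by
  unfold get_gene_annotation_alt
  rw [starts_len, names_eval]
  rw [if_neg (by omega), if_pos (by omega), if_pos (by omega), if_neg (by omega), if_neg (by omega)]

lemma alt_in_11 (n : Int) (h1 : (7350 : Int) ≤ n) (h2 : n < 10095) : get_gene_annotation_alt n = "NS5" := by
  unfold get_gene_annotation_alt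
  rw [starts_len, names_eval]
  rw [if_neg (by omega), if_pos (by omega), if_pos (by omega), if_neg (by omega), if_pos (by omega)]

lemma alt_in_12 (n : Int) (h1 : (10095 : Int) ≤ n) (h2 : n < 10723) : get_gene_annotation_alt n = "3UTR" := by
  unfold get_gene_annotation_alt
  rw [starts_len, names_eval]
  rw [if_neg (by omega), if_pos (by omega), if_pos (by omega), if_pos (by omega)]

lemma alt_out (n : Int) (h : n < 0 ∨ (10723 : Int) ≤ n) : get_gene_annotation_alt n = "intergenic" := by
  unfold get_gene_annotation_alt
  rw [if_pos h]

lemma scan_in_0 (n : Int) (h1 : (0 : Int) ≤ n) (h2 : n < 94) : get_gene_annotation n = "5UTR" := by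
  unfold get_gene_annotation
  simp only [geneScan]
  rw [if_pos (by omega)]

lemma scan_in_1 (n : Int) (h1 : (94 : Int) ≤ n) (h2 : n < 436) : get_gene_annotation n = "C" := by
  unfold get_gene_annotation
  simp only [geneScan]
  rw [if_neg (by omega), if_pos (by omega)]

lemma scan_in_2 (n : Int) (h1 : (436 : Int) ≤ n) (h2 : n < 934) : get_gene_annotation n = "prM" := by
  unfold get_gene_annotation
  simp only [geneScan]
  rw [if_neg (by omega), if_neg (by omega), if_pos (by omega)]

lemma scan_in_3 (n : Int) (h1 : (934 : Int) ≤ n) (h2 : n < 2419) : get_gene_annotation n = "E" := by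
  unfold get_gene_annotation
  simp only [geneScan]
  rw [if_neg (by omega), if_neg (by omega), if_neg (by omega), if_pos (by omega)]

lemma scan_in_4 (n : Int) (h1 : (2419 : Int) ≤ n) (h2 : n < 3474) : get_gene_annotation n = "NS1" := by
  unfold get_gene_annotation
  simp only [geneScan]
  rw [if_neg (by omega), if_neg (by omega), if_neg (by omega), if_neg (by omega), if_pos (by omega)]

lemma scan_in_5 (n : Int) (h1 : (3474 : Int) ≤ n) (h2 : n < 4128) : get_gene_annotation n = "NS2A" := by
  unfold get_gene_annotation
  simp only [geneScan]
  rw [if_neg (by omega), if_neg (by omega), if_neg (by omega), if_neg (by omega), if_neg (by omega), if_pos (by omega)]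

lemma scan_in_6 (n : Int) (h1 : (4128 : Int) ≤ n) (h2 : n < 4518) : get_gene_annotation n = "NS2B" := by
  unfold get_gene_annotation
  simp only [geneScan]
  rw [if_neg (by omega), if_neg (by omega), if_neg (by omega), if_neg (by omega), if_neg (by omega), if_neg (by omega), if_pos (by omega)]

lemma scan_in_7 (n : Int) (h1 : (4518 : Int) ≤ n) (h2 : n < 6378) : get_gene_annotation n = "NS3" := by
  unfold get_gene_annotation
  simp only [geneScan]
  rw [if_neg (by omega), if_neg (by omega), if_neg (by omega), if_neg (by omega), if_neg (by omega), if_neg (by omega), if_neg (by omega), if_pos (by omega)]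

lemma scan_in_8 (n : Int) (h1 : (6378 : Int) ≤ n) (h2 : n < 6531) : get_gene_annotation n = "NS4A" := by
  unfold get_gene_annotation
  simp only [geneScan]
  rw [if_neg (by omega), if_neg (by omega), if_neg (by omega), if_neg (by omega), if_neg (by omega), if_neg (by omega), if_neg (by omega), if_neg (by omega), if_pos (by omega)]

lemma scan_in_9 (n : Int) (h1 : (6531 : Int) ≤ n) (h2 : n < 6600) : get_gene_annotation n = "2K" := by
  unfold get_gene_annotation
  simp only [geneScan]
  rw [if_neg (by omega), if_neg (by omega), if_neg (by omega), if_neg (by omega), if_neg (by omega), if_neg (by omega), if_neg (by omega), if_neg (by omega), if_neg (by omega), if_pos (by omega)]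

lemma scan_in_10 (n : Int) (h1 : (6600 : Int) ≤ n) (h2 : n < 7350) : get_gene_annotation n = "NS4B" := by
  unfold get_gene_annotation
  simp only [geneScan]
  rw [if_neg (by omega), if_neg (by omega), if_neg (by omega), if_neg (by omega), if_neg (by omega), if_neg (by omega), if_neg (by omega), if_neg (by omega), if_neg (by omega), if_neg (by omega), if_pos (by omega)]

lemma scan_in_11 (n : Int) (h1 : (7350 : Int) ≤ n) (h2 : n < 10095) : get_gene_annotation n = "NS5" := by
  unfold get_gene_annotation
  simp only [geneScan]
  rw [if_neg (by omega), if_neg (by omega), if_neg (by omega), if_neg (by omega), if_neg (by omega), if_neg (by omega), if_neg (by omega), if_neg (by omega), if_neg (by omega), if_neg (by omega), if_neg (by omega), if_pos (by omega)]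

lemma scan_in_12 (n : Int) (h1 : (10095 : Int) ≤ n) (h2 : n < 10723) : get_gene_annotation n = "3UTR" := by
  unfold get_gene_annotation
  simp only [geneScan]
  rw [if_neg (by omega), if_neg (by omega), if_neg (by omega), if_neg (by omega), if_neg (by omega), if_neg (by omega), if_neg (by omega), if_neg (by omega), if_neg (by omega), if_neg (by omega), if_neg (by omega), if_neg (by omega), if_pos (by omega)]

lemma scan_out (n : Int) (h : n < 0 ∨ (10723 : Int) ≤ n) : get_gene_annotation n = "intergenic" := by
  unfold get_gene_annotation
  simp only [geneScan]
  rw [if_neg (by omega), if_neg (by omega), if_neg (by omega), if_neg (by omega), if_neg (by omega), if_neg (by omega), if_neg (by omega), if_neg (by omega), if_neg (by omega), if_neg (by omega), if_neg (by omega), if_neg (by omega), if_neg (by omega)]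

theorem get_gene_annotation_spec : Claim_equal_get_gene_annotation := by
  intro n _
  unfold Spec_get_gene_annotation
  by_cases hk0 : (0 : Int) ≤ n ∧ n < 94
  · rw [scan_in_0 n hk0.1 hk0.2, alt_in_0 n hk0.1 hk0.2]
  by_cases hk1 : (94 : Int) ≤ n ∧ n < 436
  · rw [scan_in_1 n hk1.1 hk1.2, alt_in_1 n hk1.1 hk1.2]
  by_cases hk2 : (436 : Int) ≤ n ∧ n < 934
  · rw [scan_in_2 n hk2.1 hk2.2, alt_in_2 n hk2.1 hk2.2]
  by_cases hk3 : (934 : Int) ≤ n ∧ n < 2419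
  · rw [scan_in_3 n hk3.1 hk3.2, alt_in_3 n hk3.1 hk3.2]
  by_cases hk4 : (2419 : Int) ≤ n ∧ n < 3474
  · rw [scan_in_4 n hk4.1 hk4.2, alt_in_4 n hk4.1 hk4.2]
  by_cases hk5 : (3474 : Int) ≤ n ∧ n < 4128
  · rw [scan_in_5 n hk5.1 hk5.2, alt_in_5 n hk5.1 hk5.2]
  by_cases hk6 : (4128 : Int) ≤ n ∧ n < 4518
  · rw [scan_in_6 n hk6.1 hk6.2, alt_in_6 n hk6.1 hk6.2]
  by_cases hk7 : (4518 : Int) ≤ n ∧ n < 6378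
  · rw [scan_in_7 n hk7.1 hk7.2, alt_in_7 n hk7.1 hk7.2]
  by_cases hk8 : (6378 : Int) ≤ n ∧ n < 6531
  · rw [scan_in_8 n hk8.1 hk8.2, alt_in_8 n hk8.1 hk8.2]
  by_cases hk9 : (6531 : Int) ≤ n ∧ n < 6600
  · rw [scan_in_9 n hk9.1 hk9.2, alt_in_9 n hk9.1 hk9.2]
  by_cases hk10 : (6600 : Int) ≤ n ∧ n < 7350
  · rw [scan_in_10 n hk10.1 hk10.2, alt_in_10 n hk10.1 hk10.2]
  by_cases hk11 : (7350 : Int) ≤ n ∧ n < 10095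
  · rw [scan_in_11 n hk11.1 hk11.2, alt_in_11 n hk11.1 hk11.2]
  by_cases hk12 : (10095 : Int) ≤ n ∧ n < 10723
  · rw [scan_in_12 n hk12.1 hk12.2, alt_in_12 n hk12.1 hk12.2]
  · rw [scan_out n (by omega), alt_out n (by omega)]
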